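-- pv_equiv track=rewrite | github.com/Lprob1/Nonlocal-games-Python | game.py | _strategy_tuple_to_dict
-- ===== SOURCE A (Python) =====
-- import itertools
--
-- def _strategy_tuple_to_dict(strategy_tuple):
--     """
--     Converts a deterministic strategy tuple into a dictionary:
--     (x1, ..., xn) -> (a1, ..., an)
--     """
--     # Build per-player input -> output maps
--     player_maps = []
--     for player in strategy_tuple:
--         player_maps.append(dict(player))
--
--     # Assume all players share the same input alphabet
--     inputs = list(player_maps[0].keys())
--
--     strategy = {}
--     for joint_input in itertools.product(inputs, repeat=len(player_maps)):
--         joint_output = tuple(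
--             player_maps[i][joint_input[i]]
--             for i in range(len(player_maps))
--         )
--         strategy[joint_input] = joint_output
--
--     return strategy
-- ===== SOURCE B (Python) =====
-- def _strategy_tuple_to_dict(strategy_tuple):
--     """
--     Converts a deterministic strategy tuple into a dictionary:
--     (x1, ..., xn) -> (a1, ..., an)
--     """
--     player_maps = [dict(p) for p in strategy_tuple]
--     inputs = list(player_maps[0].keys())
--     # Grow the joint table one player at a time instead of enumerating
--     # the full product and indexing each coordinate.
--     partial = [((), ())]
--     for pmap in player_maps:
--         partial = [(ins + (inp,), outs + (pmap[inp],))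
--                    for ins, outs in partial
--                    for inp in inputs]
--     return dict(partial)
-- ===== Notes on version B (the rewrite author's own statement) =====
-- stated objective: alternative
-- what changed: Replaces itertools.product plus per-coordinate dict indexing with a progressive expansion: a list of partial (inputs, outputs) rows is extended by one player's coordinate per pass, and the final dict is built once from the finished rows.
import Mathlib
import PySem

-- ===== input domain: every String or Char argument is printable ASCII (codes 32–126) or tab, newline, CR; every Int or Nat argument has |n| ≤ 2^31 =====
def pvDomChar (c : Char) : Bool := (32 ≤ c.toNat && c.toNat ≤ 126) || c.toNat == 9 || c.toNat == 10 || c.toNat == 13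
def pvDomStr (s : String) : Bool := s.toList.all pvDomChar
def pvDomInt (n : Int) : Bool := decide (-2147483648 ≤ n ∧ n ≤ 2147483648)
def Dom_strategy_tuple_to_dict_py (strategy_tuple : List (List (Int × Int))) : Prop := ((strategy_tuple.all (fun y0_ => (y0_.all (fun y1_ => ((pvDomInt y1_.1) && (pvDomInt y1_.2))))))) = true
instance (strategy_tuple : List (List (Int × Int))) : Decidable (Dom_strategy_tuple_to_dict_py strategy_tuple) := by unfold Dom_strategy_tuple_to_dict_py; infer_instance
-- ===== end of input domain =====

-- B builds the joint table by expanding one player coordinate at a time over a plain list of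
-- partial rows (no itertools.product, no per-coordinate indexing); same return value as A on Pre_.

-- ===== PORT A =====

-- dict(player): shared by both ports (both Pythons call dict(...) on each player's pair list)
def pvDictOf (player : List (Int × Int)) : PySem.Dict Int Int :=
  player.foldl (fun d kv => d.insert kv.1 kv.2) PySem.Dict.empty

-- itertools.product(inputs, repeat=n): hand port, exact for this use (first coordinate slowest)
def pvProdRep (inputs : List Int) : Nat → List (List Int)
  | 0 => [[]]
  | n+1 => inputs.flatMap (fun x => (pvProdRep inputs n).map (fun t => x :: t))

def strategy_tuple_to_dict_py (strategy_tuple : List (List (Int × Int))) : List (List Int × List Int) :=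
  let player_maps := strategy_tuple.map pvDictOf
  -- player_maps[0]: Pre_ excludes the empty tuple, on which Python raises IndexError
  let inputs := PySem.Dict.keys (player_maps.headD PySem.Dict.empty)
  ((pvProdRep inputs player_maps.length).foldl
    (fun strat ji =>
      strat.insert ji
        -- player_maps[i][joint_input[i]]: i ∈ range(n) is in range for both lists (|ji| = n);
        -- getD 0 stands for d[k]; Pre_ excludes the missing-key inputs (Python KeyError)
        ((List.range player_maps.length).map
          (fun i => PySem.Dict.getD (player_maps.getD i PySem.Dict.empty) (ji.getD i 0) 0)))
    PySem.Dict.empty).items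

-- ===== PORT B =====
def strategy_tuple_to_dict_py_alt (strategy_tuple : List (List (Int × Int))) : List (List Int × List Int) :=
  let player_maps := strategy_tuple.map pvDictOf
  -- player_maps[0]: Pre_ excludes the empty tuple (Python IndexError)
  let inputs := PySem.Dict.keys (player_maps.headD PySem.Dict.empty)
  let part := player_maps.foldl
    (fun part pmap =>
      part.flatMap (fun p =>
        -- pmap[inp] ported as getD 0; Pre_ excludes missing keys (Python KeyError)
        inputs.map (fun inp => (p.1 ++ [inp], p.2 ++ [pmap.getD inp 0]))))
    [(([] : List Int), ([] : List Int))]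
  (PySem.Dict.ofList part).items

-- ===== PRECONDITION & SPEC =====
-- Pre_ excludes exactly the inputs where Python A raises: the empty strategy tuple (IndexError on
-- player_maps[0]) and tuples where some input key of player 0 is missing from another player's map
-- (KeyError); B raises identically there.
def Pre_strategy_tuple_to_dict_py (strategy_tuple : List (List (Int × Int))) : Prop :=
  strategy_tuple ≠ [] ∧
    ∀ p ∈ strategy_tuple, ∀ kv ∈ strategy_tuple.headD [], ∃ kv' ∈ p, kv'.1 = kv.1
instance (strategy_tuple : List (List (Int × Int))) : Decidable (Pre_strategy_tuple_to_dict_py strategy_tuple) := by unfold Pre_strategy_tuple_to_dict_py; infer_instance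

def pvWitness_strategy_tuple_to_dict_py : (List (List (Int × Int))) :=
  [[(0, 1), (1, 0)], [(1, 1), (0, 0)]]

def Spec_strategy_tuple_to_dict_py (strategy_tuple : List (List (Int × Int))) (out : List (List Int × List Int)) : Prop := out = strategy_tuple_to_dict_py_alt strategy_tuple
instance (strategy_tuple : List (List (Int × Int))) (out : List (List Int × List Int)) : Decidable (Spec_strategy_tuple_to_dict_py strategy_tuple out) := by unfold Spec_strategy_tuple_to_dict_py; infer_instance

-- ===== CLAIM (what is proved, stated in full; the proofs are below) =====
def Claim_equal_strategy_tuple_to_dict_py : Prop := ∀ (strategy_tuple : List (List (Int × Int))), Dom_strategy_tuple_to_dict_py strategy_tuple → Pre_strategy_tuple_to_dict_py strategy_tuple → Spec_strategy_tuple_to_dict_py strategy_tuple (strategy_tuple_to_dict_py strategy_tuple)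

-- ===== LEMMAS AND PROOFS =====

-- B's expansion step and its fold, abstracted for the proof
def pvStep (inputs : List Int) (part : List (List Int × List Int)) (pmap : PySem.Dict Int Int) :
    List (List Int × List Int) :=
  part.flatMap (fun p => inputs.map (fun inp => (p.1 ++ [inp], p.2 ++ [pmap.getD inp 0])))

def pvE (inputs : List Int) (maps : List (PySem.Dict Int Int)) : List (List Int × List Int) :=
  maps.foldl (pvStep inputs) [([], [])]

-- the fold from an arbitrary partial list factors through the fold from the unit row
theorem pvE_shift (inputs : List Int) (maps : List (PySem.Dict Int Int))
    (P : List (List Int × List Int)) :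
    maps.foldl (pvStep inputs) P =
      P.flatMap (fun p => (pvE inputs maps).map (fun q => (p.1 ++ q.1, p.2 ++ q.2))) := by
  induction maps generalizing P with
  | nil => simp [pvE]
  | cons m ms ih =>
    simp only [List.foldl_cons, pvE]
    rw [ih, ih (pvStep inputs [([], [])] m)]
    simp only [pvStep, List.flatMap_assoc, List.flatMap_map, List.map_map, Function.comp_def]
    simp [List.map_flatMap, List.map_map, Function.comp_def, List.append_assoc]

-- front recursion for B's fold
theorem pvE_cons (inputs : List Int) (m : PySem.Dict Int Int) (ms : List (PySem.Dict Int Int)) :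
    pvE inputs (m :: ms) =
      inputs.flatMap (fun x =>
        (pvE inputs ms).map (fun q => (x :: q.1, m.getD x 0 :: q.2))) := by
  show List.foldl (pvStep inputs) (pvStep inputs [([], [])] m) ms = _
  rw [pvE_shift]
  simp [pvStep, List.map_flatMap, List.flatMap_map, Function.comp_def]

-- every tuple produced by product(inputs, repeat=n) has length n
theorem pvProdRep_len (inputs : List Int) (n : Nat) :
    ∀ t ∈ pvProdRep inputs n, t.length = n := by
  induction n with
  | zero => intro t ht; simp [pvProdRep] at ht; simp [ht]
  | succ n ih =>
    intro t ht
    simp [pvProdRep] at ht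
    obtain ⟨x, _, u, hu, rfl⟩ := ht
    simp [ih u hu]

-- B's fold builds exactly A's product entries (outputs as a zipWith)
theorem pvE_eq_prod (inputs : List Int) (maps : List (PySem.Dict Int Int)) :
    pvE inputs maps =
      (pvProdRep inputs maps.length).map
        (fun ji => (ji, List.zipWith (fun m x => PySem.Dict.getD m x 0) maps ji)) := by
  induction maps with
  | nil => simp [pvE, pvProdRep]
  | cons m ms ih =>
    rw [pvE_cons, ih]
    simp [pvProdRep, List.map_flatMap, List.flatMap_map, List.map_map, Function.comp_def]

-- A's index-by-range output equals the zipWith form when the tuple has the right length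
theorem pvRange_eq_zipWith (maps : List (PySem.Dict Int Int)) (ji : List Int)
    (h : ji.length = maps.length) :
    (List.range maps.length).map
        (fun i => PySem.Dict.getD (maps.getD i PySem.Dict.empty) (ji.getD i 0) 0) =
      List.zipWith (fun m x => PySem.Dict.getD m x 0) maps ji := by
  induction maps generalizing ji with
  | nil => simp
  | cons m ms ih =>
    cases ji with
    | nil => simp at h
    | cons x js =>
      simp only [List.length_cons] at h
      have h2 := ih js (by omega)
      simp only [List.length_cons]
      rw [List.range_succ_eq_map, List.map_cons, List.map_map]
      simp only [Function.comp_def, List.getD_eq_getElem?_getD, List.getElem?_cons_succ,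
        List.getElem?_cons_zero, Option.getD_some] at h2 ⊢
      simp [h2]

-- ===== VERDICT (by name: the statement is the Claim_ definition above) =====
theorem strategy_tuple_to_dict_py_spec : Claim_equal_strategy_tuple_to_dict_py := by
  intro st _ _
  show strategy_tuple_to_dict_py st = strategy_tuple_to_dict_py_alt st
  unfold strategy_tuple_to_dict_py strategy_tuple_to_dict_py_alt
  simp only []
  set maps := st.map pvDictOf with hmaps
  set inputs := PySem.Dict.keys (maps.headD PySem.Dict.empty) with hinputs
  -- both sides are dict-insertions of the same entry sequence
  have hpart : maps.foldl
      (fun part pmap =>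
        part.flatMap (fun p => inputs.map (fun inp => (p.1 ++ [inp], p.2 ++ [pmap.getD inp 0]))))
      [(([] : List Int), ([] : List Int))] = pvE inputs maps := rfl
  rw [hpart, pvE_eq_prod]
  have hfold : ∀ (L : List (List Int)) (d : PySem.Dict (List Int) (List Int))
      (hL : ∀ t ∈ L, t.length = maps.length),
      L.foldl (fun strat ji => strat.insert ji
          ((List.range maps.length).map
            (fun i => PySem.Dict.getD (maps.getD i PySem.Dict.empty) (ji.getD i 0) 0))) d =
        PySem.Dict.update d
          (L.map (fun ji => (ji, List.zipWith (fun m x => PySem.Dict.getD m x 0) maps ji))) := by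
    intro L
    induction L with
    | nil => intro d _; simp [PySem.Dict.update]
    | cons t ts ih =>
      intro d hL
      simp only [List.foldl_cons, List.map_cons]
      rw [pvRange_eq_zipWith maps t (hL t (by simp)), ih _ (fun u hu => hL u (by simp [hu]))]
      rfl
  rw [hfold _ _ (pvProdRep_len inputs maps.length)]
  rfl
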